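-- pv_equiv track=rewrite | github.com/shuque/parse_zone | parse_zone.py | _find_comment
-- ===== SOURCE A (Python) =====
-- def _find_comment(line: str) -> int:
--     """Find the position of a comment (;) outside of double-quoted strings."""
--     in_quote = False
--     for i, char in enumerate(line):
--         if char == '"':
--             in_quote = not in_quote
--         elif char == ';' and not in_quote:
--             return i
--     return -1
-- ===== SOURCE B (Python) =====
-- def _find_comment(line: str) -> int:
--     """Find the position of a comment (;) outside of double-quoted strings."""
--     offset = 0
--     for k, piece in enumerate(line.split('"')):
--         if k % 2 == 0:
--             j = piece.find(';')
--             if j != -1: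
--                 return offset + j
--         offset += len(piece) + 1
--     return -1
-- ===== Notes on version B (the rewrite author's own statement) =====
-- stated objective: faster
-- what changed: Replaces the per-character quote-flag scan with a split on the double-quote delimiter: even-indexed pieces are outside quotes, so the answer is the first even piece's str.find of the comment character plus a running offset.
import Mathlib
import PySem

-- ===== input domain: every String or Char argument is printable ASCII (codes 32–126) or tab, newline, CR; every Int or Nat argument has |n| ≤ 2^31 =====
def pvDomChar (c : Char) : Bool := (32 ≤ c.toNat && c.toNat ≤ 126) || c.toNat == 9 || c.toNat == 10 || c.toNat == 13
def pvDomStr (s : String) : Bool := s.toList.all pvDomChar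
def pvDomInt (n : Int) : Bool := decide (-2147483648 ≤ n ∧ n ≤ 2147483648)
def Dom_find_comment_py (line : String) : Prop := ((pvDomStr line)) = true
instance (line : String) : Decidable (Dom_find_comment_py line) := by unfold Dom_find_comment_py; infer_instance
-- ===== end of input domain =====

-- B replaces A's per-character quote-flag scan with a split on '"': even-indexed
-- pieces lie outside quotes, so the answer is the first even piece containing ';'.

-- ===== PORT A =====
-- A's loop: enumerate characters, toggling in_quote on '"', returning i at an
-- unquoted ';'.
def pvGoA : List Char → Bool → Int → Int
  | [], _, _ => -1
  | c :: cs, q, i =>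
    if c = '"' then pvGoA cs (!q) (i + 1)
    else if c = ';' ∧ q = false then i
    else pvGoA cs q (i + 1)

def find_comment_py (line : String) : Int := pvGoA line.toList false 0

-- ===== PORT B =====
-- split('"') on the character list (exact port of Python's str.split with a
-- one-character separator).
def pvSplitQuote : List Char → List (List Char)
  | [] => [[]]
  | c :: cs =>
    if c = '"' then [] :: pvSplitQuote cs
    else
      match pvSplitQuote cs with
      | [] => [[c]]            -- unreachable: pvSplitQuote never returns []
      | p :: ps => (c :: p) :: ps

-- walk the pieces; `ev` is `k % 2 == 0`, `off` the running offset.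
def pvGoB : List (List Char) → Bool → Int → Int
  | [], _, _ => -1
  | p :: ps, ev, off =>
    if ev then
      match p.findIdx? (· = ';') with
      | some j => off + (j : Int)
      | none => pvGoB ps (!ev) (off + (p.length : Int) + 1)
    else pvGoB ps (!ev) (off + (p.length : Int) + 1)

def find_comment_py_alt (line : String) : Int := pvGoB (pvSplitQuote line.toList) true 0

-- ===== PRECONDITION & SPEC =====
def Spec_find_comment_py (line : String) (out : Int) : Prop := out = find_comment_py_alt line
instance (line : String) (out : Int) : Decidable (Spec_find_comment_py line out) := by unfold Spec_find_comment_py; infer_instance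

-- ===== CLAIM (what is proved, stated in full; the proofs are below) =====
def Claim_equal_find_comment_py : Prop := ∀ (line : String), Dom_find_comment_py line → Spec_find_comment_py line (find_comment_py line)

-- ===== LEMMAS AND PROOFS =====

theorem pvSplitQuote_ne_nil (cs : List Char) : pvSplitQuote cs ≠ [] := by
  cases cs with
  | nil => simp [pvSplitQuote]
  | cons c cs =>
    simp only [pvSplitQuote]
    split
    · simp
    · cases h : pvSplitQuote cs <;> simp

theorem pvGo_eq (cs : List Char) : ∀ (q : Bool) (off : Int),
    pvGoB (pvSplitQuote cs) (!q) off = pvGoA cs q off := by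
  induction cs with
  | nil =>
    intro q off
    cases q <;> simp [pvSplitQuote, pvGoA, pvGoB, List.findIdx?_nil]
  | cons c cs ih =>
    intro q off
    by_cases hc : c = '"'
    · subst hc
      cases q with
      | false =>
        have hthis := ih true (off + 1)
        simp only [Bool.not_true] at hthis
        have hL : pvGoB (pvSplitQuote ('"' :: cs)) true off
            = pvGoB (pvSplitQuote cs) false (off + 1) := by
          simp [pvSplitQuote, pvGoB, List.findIdx?_nil]
        have hR : pvGoA ('"' :: cs) false off = pvGoA cs true (off + 1) := by
          simp [pvGoA]
        simp only [Bool.not_false]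
        rw [hL, hR]; exact hthis
      | true =>
        have hthis := ih false (off + 1)
        simp only [Bool.not_false] at hthis
        have hL : pvGoB (pvSplitQuote ('"' :: cs)) false off
            = pvGoB (pvSplitQuote cs) true (off + 1) := by
          simp [pvSplitQuote, pvGoB]
        have hR : pvGoA ('"' :: cs) true off = pvGoA cs false (off + 1) := by
          simp [pvGoA]
        simp only [Bool.not_true]
        rw [hL, hR]; exact hthis
    · cases h : pvSplitQuote cs with
      | nil => exact absurd h (pvSplitQuote_ne_nil cs)
      | cons p ps =>
        have hsplit : pvSplitQuote (c :: cs) = (c :: p) :: ps := by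
          simp [pvSplitQuote, hc, h]
        rw [hsplit]
        cases q with
        | false =>
          have ihp := ih false (off + 1)
          simp only [Bool.not_false, h] at ihp
          have hA : pvGoA (c :: cs) false off =
              if c = ';' then off else pvGoA cs false (off + 1) := by
            by_cases hs : c = ';' <;> simp [pvGoA, hc, hs]
          simp only [Bool.not_false]
          rw [hA]
          by_cases hs : c = ';'
          · simp [pvGoB, List.findIdx?_cons, hs]
          · rw [if_neg hs, ← ihp]
            have hfind : List.findIdx? (fun x => decide (x = ';')) (c :: p)
                = (List.findIdx? (fun x => decide (x = ';')) p).map (· + 1) := by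
              simp [List.findIdx?_cons, hs]
            cases hf : List.findIdx? (fun x => decide (x = ';')) p with
            | some j =>
              simp only [pvGoB, hfind, hf, Option.map_some]
              push_cast; ring
            | none =>
              simp only [pvGoB, hfind, hf, Option.map_none,
                Bool.not_true, List.length_cons]
              have harg : off + (((p.length + 1 : Nat)) : Int) + 1
                  = off + 1 + (p.length : Int) + 1 := by push_cast; ring
              rw [harg]
        | true =>
          have ihp := ih true (off + 1)
          simp only [Bool.not_true, h] at ihp
          have hA : pvGoA (c :: cs) true off = pvGoA cs true (off + 1) := by
            simp [pvGoA, hc]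
          have hB : pvGoB ((c :: p) :: ps) false off
              = pvGoB (p :: ps) false (off + 1) := by
            simp only [pvGoB, if_neg (by simp : ¬ false = true), Bool.not_false,
              List.length_cons]
            have harg : off + (((p.length + 1 : Nat)) : Int) + 1
                = off + 1 + (p.length : Int) + 1 := by push_cast; ring
            rw [harg]
          simp only [Bool.not_true]
          rw [hB, ihp, hA]

-- ===== VERDICT (by name: the statement is the Claim_ definition above) =====
theorem find_comment_py_spec : Claim_equal_find_comment_py := by
  intro line _
  unfold Spec_find_comment_py find_comment_py find_comment_py_alt
  exact (pvGo_eq line.toList false 0).symm
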